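-- pv_equiv track=rewrite | github.com/Alibaba-NLP/MaskSearch | src/multi_agent/web_news_get.py | merge_news_insert
-- ===== SOURCE A (Python) =====
-- def merge_news_insert(lists, num=10):
--     result = []
--     indices = [0] * len(lists)
--     list_count = len(lists)
--     element_count = 0
--
--     while element_count < num:
--         for i in range(list_count):
--             current_list = lists[i]
--
--             if indices[i] < len(current_list):
--                 result.append(current_list[indices[i]])
--                 indices[i] += 1
--                 element_count += 1
--
--             if element_count >= num:
--                 break
--
--         if all(indices[j] >= len(lists[j]) for j in range(list_count)):
--             break
--
--     return result
-- ===== SOURCE B (Python) =====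
-- def merge_news_insert(lists, num=10):
--     # Decorate-sort-undecorate: encode each element's global round-robin rank as
--     # round * width + list_index, sort the ranks, decode the first num of them.
--     width = len(lists)
--     codes = sorted(k * width + i for i, lst in enumerate(lists) for k in range(len(lst)))
--     return [lists[c % width][c // width] for c in codes[:max(num, 0)]]
-- ===== Notes on version B (the rewrite author's own statement) =====
-- stated objective: alternative
-- what changed: Replaces A's stateful while-loop (an indices array, per-round appends, and an all()-exhaustion rescan each round) by a decorate-sort-undecorate algorithm: each element's global round-robin rank is encoded as round*width + list_index, the ranks are sorted, and the first num of them are decoded back into elements.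
import Mathlib
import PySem

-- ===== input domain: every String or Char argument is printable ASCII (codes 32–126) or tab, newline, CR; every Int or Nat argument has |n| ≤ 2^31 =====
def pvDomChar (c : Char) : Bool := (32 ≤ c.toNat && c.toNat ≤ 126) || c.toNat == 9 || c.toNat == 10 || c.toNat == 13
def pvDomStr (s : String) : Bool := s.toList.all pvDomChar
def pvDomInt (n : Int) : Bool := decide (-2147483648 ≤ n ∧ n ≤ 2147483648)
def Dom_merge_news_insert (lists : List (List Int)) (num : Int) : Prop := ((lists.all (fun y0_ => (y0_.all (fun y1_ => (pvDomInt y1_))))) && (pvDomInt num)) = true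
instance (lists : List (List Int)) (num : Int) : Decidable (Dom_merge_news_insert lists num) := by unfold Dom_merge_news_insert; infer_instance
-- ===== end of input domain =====

-- B replaces A's stateful round-robin while-loop (indices array + an all()-exhaustion
-- rescan every round) by a decorate-sort-undecorate algorithm: encode each element's
-- global round-robin rank as round*width + list_index, sort the ranks, decode the
-- first num of them; objective: alternative (a different algorithm, not faster).

-- ===== PORT A =====
-- inner `for i in range(list_count)` with the two body ifs and the break on element_count >= num;
-- state = (indices, result, element_count).  current_list[indices[i]] is ported with pyGetD
-- (default 0): the preceding guard indices[i] < len(current_list) keeps the index in range.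
def mnFor (lists : List (List Int)) (num : Int) :
    List Nat → List Int → List Int → Int → List Int × List Int × Int
  | [], idxs, res, cnt => (idxs, res, cnt)
  | i :: is, idxs, res, cnt =>
      let current := lists.getD i []
      let st :=
        if idxs.getD i 0 < (current.length : Int) then
          (idxs.set i (idxs.getD i 0 + 1),
           res ++ [PySem.List.pyGetD current (idxs.getD i 0) 0],
           cnt + 1)
        else (idxs, res, cnt)
      if st.2.2 ≥ num then st else mnFor lists num is st.1 st.2.1 st.2.2

-- outer `while element_count < num`, then the all(...)-exhaustion break.
-- fuel num.toNat + 1 is enough: each round either appends ≥ 1 element (and element_count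
-- stays < num on entry) or the all-exhausted break fires.
def mnWhile (lists : List (List Int)) (num : Int) :
    Nat → List Int → List Int → Int → List Int
  | 0, _, res, _ => res
  | fuel + 1, idxs, res, cnt =>
      if cnt < num then
        let st := mnFor lists num (List.range lists.length) idxs res cnt
        if (List.range lists.length).all
            (fun j => ((lists.getD j []).length : Int) ≤ st.1.getD j 0) then st.2.1
        else mnWhile lists num fuel st.1 st.2.1 st.2.2
      else res

def merge_news_insert (lists : List (List Int)) (num : Int) : List Int :=
  mnWhile lists num (num.toNat + 1) (List.replicate lists.length 0) [] 0

-- ===== PORT B =====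
-- width = len(lists); sorted(k*width + i for i, lst in enumerate(lists) for k in range(len(lst)))
-- → PySem.List.sorted over the enumerate/range flatMap; codes[:max(num, 0)] → slice;
-- lists[c % width][c // width] → pyGetD with Python's mod/floordiv (c ≥ 0, width > 0 whenever
-- a code exists, so the indices are in range and the default 0/[] is never taken).
def merge_news_insert_alt (lists : List (List Int)) (num : Int) : List Int :=
  let width : Int := lists.length
  let codes := PySem.List.sorted
    ((PySem.List.enumerate lists).flatMap
      (fun p => (List.range p.2.length).map (fun (k : Nat) => (k : Int) * width + p.1)))
    (fun c => c)
  (PySem.List.slice codes none (some (max num 0))).map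
    (fun c => PySem.List.pyGetD (PySem.List.pyGetD lists (PySem.Int.mod c width) [])
      (PySem.Int.floordiv c width) 0)

-- ===== PRECONDITION & SPEC =====
def Spec_merge_news_insert (lists : List (List Int)) (num : Int) (out : List Int) : Prop := out = merge_news_insert_alt lists num
instance (lists : List (List Int)) (num : Int) (out : List Int) : Decidable (Spec_merge_news_insert lists num out) := by unfold Spec_merge_news_insert; infer_instance

-- ===== CLAIM (what is proved, stated in full; the proofs are below) =====
def Claim_equal_merge_news_insert : Prop := ∀ (lists : List (List Int)) (num : Int), Dom_merge_news_insert lists num → Spec_merge_news_insert lists num (merge_news_insert lists num)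

-- ===== LEMMAS AND PROOFS =====

-- the k-th round-robin column
def colAt (lists : List (List Int)) (r : Nat) : List Int := lists.filterMap (fun l => l[r]?)

-- A's indices array after r full rounds and, within round r, after the first i0 lists
def mkIdx (lists : List (List Int)) (r i0 : Nat) : List Int :=
  (List.range lists.length).map
    (fun j => ((min (if j < i0 then r + 1 else r) (lists.getD j []).length : Nat) : Int))

def mlen (lists : List (List Int)) : Nat := (lists.map List.length).foldl max 0

-- columns from r on, flattened
def tcols (lists : List (List Int)) (r : Nat) : List Int :=
  (List.range' r (mlen lists - r)).flatMap (colAt lists)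

lemma foldl_max_le (L : List Nat) (a m : Nat) :
    L.foldl max a ≤ m ↔ a ≤ m ∧ ∀ x ∈ L, x ≤ m := by
  induction L generalizing a with
  | nil => simp
  | cons x t ih => simp [List.foldl_cons, ih]; tauto

lemma mlen_le (lists : List (List Int)) (m : Nat) :
    mlen lists ≤ m ↔ ∀ l ∈ lists, l.length ≤ m := by
  unfold mlen
  rw [foldl_max_le]
  simp

lemma len_le_mlen (lists : List (List Int)) (l : List Int) (h : l ∈ lists) :
    l.length ≤ mlen lists := ((mlen_le lists (mlen lists)).1 le_rfl) l h

lemma colAt_nil (lists : List (List Int)) (r : Nat) (h : mlen lists ≤ r) :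
    colAt lists r = [] := by
  rw [colAt, List.filterMap_eq_nil_iff]
  intro l hl
  have := (mlen_le lists r).1 h l hl
  simp
  omega

lemma tcols_empty (lists : List (List Int)) (r : Nat) (h : mlen lists ≤ r) :
    tcols lists r = [] := by
  unfold tcols
  have : mlen lists - r = 0 := by omega
  simp [this]

lemma tcols_succ (lists : List (List Int)) (r : Nat) :
    tcols lists r = colAt lists r ++ tcols lists (r + 1) := by
  by_cases h : mlen lists ≤ r
  · rw [tcols_empty _ _ h, tcols_empty _ _ (by omega), colAt_nil _ _ h]
    simp
  · unfold tcols
    have h1 : mlen lists - r = (mlen lists - (r + 1)) + 1 := by omega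
    rw [h1, List.range'_succ, List.flatMap_cons]

lemma mkIdx_length (lists : List (List Int)) (r i0 : Nat) :
    (mkIdx lists r i0).length = lists.length := by simp [mkIdx]

lemma mkIdx_getD (lists : List (List Int)) (r i0 j : Nat) (hj : j < lists.length) :
    (mkIdx lists r i0).getD j 0 =
      ((min (if j < i0 then r + 1 else r) (lists.getD j []).length : Nat) : Int) := by
  rw [List.getD_eq_getElem _ _ (by simp [mkIdx_length]; omega)]
  simp [mkIdx]

lemma mkIdx_set (lists : List (List Int)) (r i0 : Nat) (_ : i0 < lists.length)
    (hr : r < (lists.getD i0 []).length) :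
    (mkIdx lists r i0).set i0 ((min r (lists.getD i0 []).length : Nat) + 1) =
      mkIdx lists r (i0 + 1) := by
  apply List.ext_getElem
  · simp [mkIdx_length]
  · intro j hj hj'
    rw [List.getElem_set]
    simp only [mkIdx, List.getElem_map, List.getElem_range]
    split_ifs with h1 h2 h3 h4 h5 <;>
      first
        | rfl
        | omega
        | (subst h1; push_cast; omega)

lemma mkIdx_skip (lists : List (List Int)) (r i0 : Nat)
    (hr : (lists.getD i0 []).length ≤ r) :
    mkIdx lists r i0 = mkIdx lists r (i0 + 1) := by
  apply List.ext_getElem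
  · simp [mkIdx_length]
  · intro j hj hj'
    simp only [mkIdx, List.getElem_map, List.getElem_range]
    split_ifs with h1 h2 h3 <;> try rfl
    · omega
    · have : j = i0 := by omega
      subst this
      congr 1
      omega

lemma mkIdx_full (lists : List (List Int)) (r : Nat) :
    mkIdx lists r lists.length = mkIdx lists (r + 1) 0 := by
  apply List.ext_getElem
  · simp [mkIdx_length]
  · intro j hj hj'
    simp only [mkIdx, List.getElem_map, List.getElem_range]
    have hjl : j < lists.length := by simpa [mkIdx_length] using hj
    simp [hjl]

lemma mkIdx_init (lists : List (List Int)) :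
    List.replicate lists.length (0 : Int) = mkIdx lists 0 0 := by
  apply List.ext_getElem
  · simp [mkIdx_length]
  · intro j hj hj'
    simp [mkIdx]

lemma drop_filterMap_col (lists : List (List Int)) (r i0 : Nat) (hi : i0 < lists.length) :
    (lists.drop i0).filterMap (fun l => l[r]?) =
      ((lists.getD i0 [])[r]?.toList) ++ (lists.drop (i0 + 1)).filterMap (fun l => l[r]?) := by
  rw [List.drop_eq_getElem_cons hi, List.filterMap_cons, List.getD_eq_getElem _ _ hi]
  cases lists[i0][r]? <;> simp

lemma mnFor_spec (lists : List (List Int)) (num : Int) (r : Nat) :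
    ∀ (n i0 : Nat) (res : List Int) (cnt : Int),
      n = lists.length - i0 → i0 ≤ lists.length → cnt < num →
      let st := mnFor lists num (List.range' i0 n) (mkIdx lists r i0) res cnt
      let c := (lists.drop i0).filterMap (fun l => l[r]?)
      let t := min c.length (num - cnt).toNat
      st.2.1 = res ++ c.take t ∧ st.2.2 = cnt + (t : Int) ∧
        (cnt + (t : Int) < num → st.1 = mkIdx lists r lists.length) := by
  intro n
  induction n with
  | zero =>
    intro i0 res cnt hn hi hcnt
    have : i0 = lists.length := by omega
    subst this
    simp [mnFor, List.drop_length]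
  | succ n ih =>
    intro i0 res cnt hn hi hcnt
    have hi0 : i0 < lists.length := by omega
    rw [List.range'_succ]
    simp only [mnFor]
    rw [mkIdx_getD lists r i0 i0 hi0]
    simp only [lt_self_iff_false, if_false]
    by_cases hr : r < (lists.getD i0 []).length
    · -- this list still has an element at round r
      have hmin : min r (lists.getD i0 []).length = r := by omega
      have hguard : ((min r (lists.getD i0 []).length : Nat) : Int) <
          ((lists.getD i0 []).length : Int) := by push_cast; omega
      rw [if_pos hguard]
      have hget : PySem.List.pyGetD (lists.getD i0 [])
          ((min r (lists.getD i0 []).length : Nat) : Int) 0 = (lists.getD i0 []).getD r 0 := by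
        rw [PySem.List.pyGetD_natCast, hmin]
      have hx : (lists.getD i0 []).getD r 0 = (lists.getD i0 [])[r]'hr := by
        rw [List.getD_eq_getElem _ _ hr]
      have hcol : (lists.drop i0).filterMap (fun l => l[r]?) =
          (lists.getD i0 [])[r]'hr :: (lists.drop (i0 + 1)).filterMap (fun l => l[r]?) := by
        rw [drop_filterMap_col lists r i0 hi0]
        rw [List.getElem?_eq_getElem hr]
        simp
      have hset : (mkIdx lists r i0).set i0
          (((min r (lists.getD i0 []).length : Nat) : Int) + 1) = mkIdx lists r (i0 + 1) := by
        have := mkIdx_set lists r i0 hi0 hr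
        push_cast at this ⊢
        exact this
      simp only [hget, hx, hset]
      by_cases hb : cnt + 1 ≥ num
      · -- break: element_count reached num
        rw [if_pos hb]
        have hnum : num = cnt + 1 := by omega
        refine ⟨?_, ?_, ?_⟩
        · rw [hcol]
          have ht : min ((lists.drop (i0+1)).filterMap (fun l => l[r]?)).length.succ
              (num - cnt).toNat = 1 := by omega
          simp only [List.length_cons, ht]
          simp [List.take]
        · have ht : min ((lists.drop (i0+1)).filterMap (fun l => l[r]?)).length.succ
              (num - cnt).toNat = 1 := by omega
          rw [hcol]
          simp only [List.length_cons, ht]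
          push_cast
          omega
        · intro hlt
          exfalso
          rw [hcol] at hlt
          simp only [List.length_cons] at hlt
          have ht : min ((lists.drop (i0+1)).filterMap (fun l => l[r]?)).length.succ
              (num - cnt).toNat = 1 := by omega
          rw [ht] at hlt
          omega
      · rw [if_neg hb]
        have hcnt1 : cnt + 1 < num := by omega
        have IH := ih (i0 + 1) (res ++ [(lists.getD i0 [])[r]'hr]) (cnt + 1)
          (by omega) (by omega) hcnt1
        obtain ⟨IH1, IH2, IH3⟩ := IH
        set c' := (lists.drop (i0 + 1)).filterMap (fun l => l[r]?) with hc'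
        have htn : (num - cnt).toNat = (num - (cnt + 1)).toNat + 1 := by omega
        have hmins : min (c'.length + 1) (num - cnt).toNat =
            min c'.length (num - (cnt + 1)).toNat + 1 := by omega
        refine ⟨?_, ?_, ?_⟩
        · rw [IH1, hcol, List.length_cons, hmins, List.take_succ_cons]
          simp
        · rw [IH2, hcol, List.length_cons, hmins]
          push_cast
          ring
        · intro hlt
          apply IH3
          rw [hcol] at hlt
          simp only [List.length_cons] at hlt
          rw [hmins] at hlt
          push_cast at hlt ⊢
          omega
    · -- exhausted list: no append
      have hguard : ¬ ((min r (lists.getD i0 []).length : Nat) : Int) <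
          ((lists.getD i0 []).length : Int) := by push_cast; omega
      rw [if_neg hguard]
      have hb : ¬ cnt ≥ num := by omega
      rw [if_neg hb]
      rw [mkIdx_skip lists r i0 (by omega)]
      have IH := ih (i0 + 1) res cnt (by omega) (by omega) hcnt
      have hcol : (lists.drop i0).filterMap (fun l => l[r]?) =
          (lists.drop (i0 + 1)).filterMap (fun l => l[r]?) := by
        rw [drop_filterMap_col lists r i0 hi0]
        rw [List.getElem?_eq_none (by omega)]
        simp
      rw [hcol]
      exact IH

lemma colAt_ne_nil (lists : List (List Int)) (r : Nat) (h : ¬ mlen lists ≤ r) :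
    colAt lists r ≠ [] := by
  intro hc
  apply h
  rw [mlen_le]
  intro l hl
  by_contra hlen
  have : l[r]? = some (l[r]'(by omega)) := List.getElem?_eq_getElem (by omega)
  have : (l[r]'(by omega : r < l.length)) ∈ colAt lists r := by
    rw [colAt, List.mem_filterMap]
    exact ⟨l, hl, this⟩
  rw [hc] at this
  simp at this

lemma mnWhile_spec (lists : List (List Int)) (num : Int) :
    ∀ (fuel : Nat) (r : Nat) (res : List Int) (cnt : Int),
      (num - cnt).toNat < fuel →
      mnWhile lists num fuel (mkIdx lists r 0) res cnt =
        res ++ (tcols lists r).take (num - cnt).toNat := by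
  intro fuel
  induction fuel with
  | zero => intro r res cnt h; omega
  | succ fuel ih =>
    intro r res cnt hfuel
    simp only [mnWhile]
    by_cases hcnt : cnt < num
    · rw [if_pos hcnt]
      have hspec := mnFor_spec lists num r lists.length 0 res cnt (by omega) (by omega) hcnt
      rw [← List.range_eq_range'] at hspec
      simp only [List.drop_zero] at hspec
      obtain ⟨h1, h2, h3⟩ := hspec
      set st := mnFor lists num (List.range lists.length) (mkIdx lists r 0) res cnt with hst
      set c := lists.filterMap (fun l => l[r]?) with hc
      have hcEq : colAt lists r = c := rfl
      set t := min c.length (num - cnt).toNat with ht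
      by_cases hfull : cnt + (t : Int) < num
      · -- full round: t = c.length, indices advanced everywhere
        have htc : t = c.length := by omega
        have hidx : st.1 = mkIdx lists (r + 1) 0 := by
          rw [h3 hfull, mkIdx_full]
        have hallIff : ((List.range lists.length).all
            (fun j => decide (((lists.getD j []).length : Int) ≤ st.1.getD j 0)) = true) ↔
            mlen lists ≤ r + 1 := by
          rw [List.all_eq_true]
          constructor
          · intro hall
            rw [mlen_le]
            intro l hl
            obtain ⟨j, hj, hjl⟩ := List.mem_iff_getElem.1 hl
            have h5 := hall j (List.mem_range.2 hj)
            rw [hidx, mkIdx_getD lists (r+1) 0 j hj] at h5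
            simp only [Nat.not_lt_zero, if_false, decide_eq_true_eq] at h5
            rw [List.getD_eq_getElem _ _ hj, hjl] at h5
            push_cast at h5
            omega
          · intro hm j hj
            rw [List.mem_range] at hj
            rw [hidx, mkIdx_getD lists (r+1) 0 j hj]
            simp only [Nat.not_lt_zero, if_false, decide_eq_true_eq]
            have h6 : (lists.getD j []).length ≤ mlen lists := by
              rw [List.getD_eq_getElem _ _ hj]
              exact len_le_mlen lists _ (List.getElem_mem hj)
            have h7 : (lists.getD j []).length ≤ r + 1 := by
              rw [List.getD_eq_getElem _ _ hj]
              exact (mlen_le lists (r+1)).1 hm _ (List.getElem_mem hj)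
            push_cast
            omega
        by_cases hall : mlen lists ≤ r + 1
        · rw [if_pos (hallIff.2 hall)]
          rw [h1, htc, List.take_length]
          rw [tcols_succ, tcols_empty _ _ hall, hcEq]
          rw [List.append_nil, List.take_of_length_le (by omega)]
        · rw [if_neg (fun hh => hall (hallIff.1 hh))]
          have hne : c ≠ [] := by rw [← hcEq]; exact colAt_ne_nil lists r (by omega)
          have hct : 0 < c.length := List.length_pos_of_ne_nil hne
          have ht1 : 1 ≤ t := by omega
          rw [h1, h2, hidx]
          have hfb : (num - (cnt + (t : Int))).toNat < fuel := by omega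
          rw [ih (r + 1) (res ++ c.take t) (cnt + (t : Int)) hfb]
          conv_rhs => rw [tcols_succ]
          rw [hcEq, List.take_append, List.append_assoc]
          congr 2
          · rw [htc, List.take_length, List.take_of_length_le (by omega)]
          · congr 1
            omega
      · -- num reached within this round
        have htv : (t : Int) = num - cnt := by omega
        have hres : st.2.1 = res ++ (tcols lists r).take (num - cnt).toNat := by
          have htn2 : t = (num - cnt).toNat := by omega
          rw [h1, tcols_succ, hcEq, List.take_append_of_le_length (by omega), htn2]
        by_cases hall : (List.range lists.length).all
            (fun j => decide (((lists.getD j []).length : Int) ≤ st.1.getD j 0)) = true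
        · rw [if_pos hall]; exact hres
        · rw [if_neg hall]
          have hf1 : 1 ≤ fuel := by omega
          obtain ⟨fuel', rfl⟩ : ∃ f, fuel = f + 1 := ⟨fuel - 1, by omega⟩
          simp only [mnWhile]
          rw [if_neg (by rw [h2]; omega)]
          exact hres
    · rw [if_neg hcnt]
      have : (num - cnt).toNat = 0 := by omega
      simp [this]

-- A's result, characterised
lemma merge_A_eq (lists : List (List Int)) (num : Int) :
    merge_news_insert lists num = (tcols lists 0).take num.toNat := by
  unfold merge_news_insert
  rw [mkIdx_init]
  rw [mnWhile_spec lists num (num.toNat + 1) 0 [] 0 (by omega)]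
  simp

-- ===== B-side lemmas: the sorted rank codes are the round-robin order =====

-- the rank code of element k of list i (k*W + i, as B encodes it)
def codeOf (W k i : Nat) : Int := (k : Int) * (W : Int) + (i : Int)

lemma codeOf_natCast (W k i : Nat) : codeOf W k i = ((k * W + i : Nat) : Int) := by
  unfold codeOf; push_cast; ring

-- column k's codes, in increasing list index
def colCodes (lists : List (List Int)) (k : Nat) : List Int :=
  ((List.range lists.length).filter (fun i => decide (k < (lists.getD i []).length))).map
    (fun i => codeOf lists.length k i)

-- all codes in round-robin (sorted) order
def allCodes (lists : List (List Int)) : List Int :=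
  (List.range (mlen lists)).flatMap (colCodes lists)

lemma codeOf_inj (W k i k' i' : Nat) (hi : i < W) (hi' : i' < W)
    (h : codeOf W k i = codeOf W k' i') : k = k' ∧ i = i' := by
  rw [codeOf_natCast, codeOf_natCast, Int.natCast_inj] at h
  constructor
  · have := congrArg (· / W) h
    simpa [Nat.mul_comm, Nat.mul_add_div (by omega : 0 < W), Nat.div_eq_of_lt hi,
      Nat.div_eq_of_lt hi'] using this
  · have := congrArg (· % W) h
    simpa [Nat.mul_comm, Nat.mul_add_mod, Nat.mod_eq_of_lt hi, Nat.mod_eq_of_lt hi'] using this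

-- B's enumerate/range flatMap, rewritten as an index flatMap (start generalised)
lemma enum_flat (W : Int) :
    ∀ (ls : List (List Int)) (s : Int),
      (PySem.List.enumerate ls s).flatMap
          (fun p => (List.range p.2.length).map (fun (k : Nat) => (k : Int) * W + p.1)) =
        (List.range ls.length).flatMap
          (fun i => (List.range (ls.getD i []).length).map (fun (k : Nat) => (k : Int) * W + (s + (i : Int)))) := by
  intro ls
  induction ls with
  | nil => intro s; simp [PySem.List.enumerate_nil]
  | cons x xs ih =>
    intro s
    rw [PySem.List.enumerate_cons, List.flatMap_cons, ih (s + 1)]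
    rw [List.length_cons, List.range_succ_eq_map, List.flatMap_cons, List.flatMap_map]
    congr 1
    · simp
    · apply List.flatMap_congr
      intro i _
      rw [List.getD_cons_succ]
      apply List.map_congr_left
      intro k _
      push_cast
      ring

lemma mem_codes_iff (lists : List (List Int)) (c : Int) :
    (c ∈ (List.range lists.length).flatMap
        (fun i => (List.range (lists.getD i []).length).map (fun k => codeOf lists.length k i))) ↔
      ∃ i k, i < lists.length ∧ k < (lists.getD i []).length ∧ c = codeOf lists.length k i := by
  simp only [List.mem_flatMap, List.mem_range, List.mem_map]
  constructor
  · rintro ⟨i, hi, k, hk, rfl⟩; exact ⟨i, k, hi, hk, rfl⟩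
  · rintro ⟨i, k, hi, hk, rfl⟩; exact ⟨i, hi, k, hk, rfl⟩

lemma mem_allCodes_iff (lists : List (List Int)) (c : Int) :
    c ∈ allCodes lists ↔
      ∃ i k, i < lists.length ∧ k < (lists.getD i []).length ∧ c = codeOf lists.length k i := by
  unfold allCodes colCodes
  simp only [List.mem_flatMap, List.mem_range, List.mem_map, List.mem_filter,
    decide_eq_true_eq]
  constructor
  · rintro ⟨k, hk, i, ⟨hi, hki⟩, rfl⟩; exact ⟨i, k, hi, hki, rfl⟩
  · rintro ⟨i, k, hi, hk, rfl⟩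
    refine ⟨k, ?_, i, ⟨hi, hk⟩, rfl⟩
    calc k < (lists.getD i []).length := hk
      _ ≤ mlen lists := by
          rw [List.getD_eq_getElem _ _ hi]
          exact len_le_mlen lists _ (List.getElem_mem hi)

lemma nodup_codes (lists : List (List Int)) :
    ((List.range lists.length).flatMap
      (fun i => (List.range (lists.getD i []).length).map (fun k => codeOf lists.length k i))).Nodup := by
  rw [List.nodup_flatMap]
  constructor
  · intro i hi
    rw [List.mem_range] at hi
    apply List.Nodup.map_on _ (List.nodup_range)
    intro k _ k' _ h
    exact (codeOf_inj lists.length k i k' i hi hi h).1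
  · rw [List.pairwise_iff_getElem]
    intro p q hp hq hpq
    simp only [List.getElem_range]
    intro c hc hc'
    simp only [List.mem_map, List.mem_range] at hc hc'
    obtain ⟨k, _, rfl⟩ := hc
    obtain ⟨k', _, h⟩ := hc'
    have := (codeOf_inj lists.length k' q k p (by simpa using hq) (by simpa using hp) h).2
    omega

lemma nodup_allCodes (lists : List (List Int)) : (allCodes lists).Nodup := by
  unfold allCodes
  rw [List.nodup_flatMap]
  constructor
  · intro k _
    unfold colCodes
    apply List.Nodup.map_on _ ((List.nodup_range).filter _)
    intro i hi i' hi' h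
    rw [List.mem_filter, List.mem_range] at hi hi'
    exact (codeOf_inj lists.length k i k i' hi.1 hi'.1 h).2
  · rw [List.pairwise_iff_getElem]
    intro p q hp hq hpq
    simp only [List.getElem_range]
    intro c hc hd
    unfold colCodes at hc hd
    simp only [List.mem_map, List.mem_filter, List.mem_range, decide_eq_true_eq] at hc hd
    obtain ⟨i, ⟨hi, _⟩, rfl⟩ := hc
    obtain ⟨i', ⟨hi', _⟩, h⟩ := hd
    have := (codeOf_inj lists.length p i q i' hi hi' h.symm).1
    omega

lemma pairwise_allCodes (lists : List (List Int)) :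
    (allCodes lists).Pairwise (fun a b => a < b) := by
  unfold allCodes
  rw [List.pairwise_flatMap]
  constructor
  · intro k _
    unfold colCodes
    apply List.Pairwise.map _ _ ((List.pairwise_lt_range).filter _)
    intro i i' hii'
    rw [codeOf_natCast, codeOf_natCast, Nat.cast_lt]
    exact Nat.add_lt_add_left hii' _
  · rw [List.pairwise_iff_getElem]
    intro p q hp hq hpq
    simp only [List.getElem_range]
    intro c hc d hd
    unfold colCodes at hc hd
    simp only [List.mem_map, List.mem_filter, List.mem_range, decide_eq_true_eq] at hc hd
    obtain ⟨i, ⟨hi, _⟩, rfl⟩ := hc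
    obtain ⟨i', ⟨hi', _⟩, rfl⟩ := hd
    rw [codeOf_natCast, codeOf_natCast, Nat.cast_lt]
    calc p * lists.length + i < p * lists.length + lists.length := Nat.add_lt_add_left hi _
      _ = (p + 1) * lists.length := by ring
      _ ≤ q * lists.length := Nat.mul_le_mul_right _ (by simpa using hpq)
      _ ≤ q * lists.length + i' := Nat.le_add_right _ _

lemma sorted_codes (lists : List (List Int)) :
    PySem.List.sorted
      ((List.range lists.length).flatMap
        (fun i => (List.range (lists.getD i []).length).map (fun k => codeOf lists.length k i)))
      (fun c => c) = allCodes lists := by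
  apply PySem.List.sorted_eq_of_perm_of_pairwise_lt
  · rw [List.perm_ext_iff_of_nodup (nodup_allCodes lists) (nodup_codes lists)]
    intro c
    rw [mem_allCodes_iff, mem_codes_iff]
  · exact pairwise_allCodes lists

-- decoding a column's codes gives the column
lemma colAt_eq_map_filter (k : Nat) :
    ∀ (lists : List (List Int)),
      colAt lists k =
        ((List.range lists.length).filter (fun i => decide (k < (lists.getD i []).length))).map
          (fun i => (lists.getD i []).getD k 0) := by
  intro lists
  induction lists with
  | nil => simp [colAt]
  | cons l ls ih =>
    have hf : ((fun i => decide (k < ((l :: ls).getD i []).length)) ∘ Nat.succ)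
        = (fun i => decide (k < (ls.getD i []).length)) := by
      funext i; simp
    have hg : ((fun i => ((l :: ls).getD i []).getD k 0) ∘ Nat.succ)
        = (fun i => (ls.getD i []).getD k 0) := by
      funext i; simp
    rw [colAt, List.filterMap_cons, List.length_cons, List.range_succ_eq_map,
      List.filter_cons]
    by_cases hk : k < l.length
    · rw [List.getElem?_eq_getElem hk]
      rw [if_pos (by simpa using hk)]
      simp only [List.map_cons, List.filter_map, List.map_map, hf, hg, ← ih]
      rw [colAt]
      simp [List.getElem?_eq_getElem hk]
    · rw [List.getElem?_eq_none (by omega)]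
      rw [if_neg (by simpa using hk)]
      simp only [List.filter_map, List.map_map, hf, hg, ← ih]
      rw [colAt]

-- decoding all codes gives the full round-robin interleaving
lemma map_decode_allCodes (lists : List (List Int)) :
    (allCodes lists).map
        (fun c => PySem.List.pyGetD
          (PySem.List.pyGetD lists (PySem.Int.mod c (lists.length : Int)) [])
          (PySem.Int.floordiv c (lists.length : Int)) 0) =
      tcols lists 0 := by
  unfold allCodes
  rw [List.map_flatMap]
  rw [tcols, Nat.sub_zero, ← List.range_eq_range']
  apply List.flatMap_congr
  intro k _
  unfold colCodes
  rw [List.map_map, colAt_eq_map_filter]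
  apply List.map_congr_left
  intro i hi
  rw [List.mem_filter, List.mem_range] at hi
  obtain ⟨hi, _⟩ := hi
  have hW : 0 < lists.length := by omega
  have h1 : (k * lists.length + i) % lists.length = i := by
    rw [Nat.mul_comm, Nat.mul_add_mod]; exact Nat.mod_eq_of_lt hi
  have h2 : (k * lists.length + i) / lists.length = k := by
    rw [Nat.mul_comm, Nat.mul_add_div hW]; simp [Nat.div_eq_of_lt hi]
  simp only [Function.comp_apply, codeOf_natCast]
  rw [PySem.Int.mod_natCast, PySem.Int.floordiv_natCast, h1, h2,
    PySem.List.pyGetD_natCast, PySem.List.pyGetD_natCast]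

-- ===== VERDICT (by name: the statement is the Claim_ definition above) =====
-- B's result, characterised
lemma merge_B_eq (lists : List (List Int)) (num : Int) :
    merge_news_insert_alt lists num = (tcols lists 0).take (max num 0).toNat := by
  simp only [merge_news_insert_alt]
  rw [enum_flat (lists.length : Int) lists 0]
  have he : (List.range lists.length).flatMap
      (fun i => (List.range (lists.getD i []).length).map
        (fun (k : Nat) => (k : Int) * (lists.length : Int) + ((0 : Int) + (i : Int)))) =
    (List.range lists.length).flatMap
      (fun i => (List.range (lists.getD i []).length).map
        (fun k => codeOf lists.length k i)) := by
    apply List.flatMap_congr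
    intro i _
    apply List.map_congr_left
    intro k _
    rw [codeOf]
    ring
  rw [he, sorted_codes, PySem.List.slice_to _ (le_max_right num 0),
    List.map_take, map_decode_allCodes]

-- ===== equivalence =====
theorem merge_news_insert_spec : Claim_equal_merge_news_insert := by
  intro lists num _
  show merge_news_insert lists num = merge_news_insert_alt lists num
  rw [merge_A_eq, merge_B_eq]
  congr 1
  omega
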